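-- pv_equiv track=rewrite | github.com/Arthvrr/LINFO2263-Projects | Projet 1/module_1_4_smoothed.py | preprocess_tokens
-- ===== SOURCE A (Python) =====
-- to_skip = ['(', ')', '[', ']', '{', '}', ':', ';', '=', '-', '/', '\\', '"', "'"]
--
-- def preprocess_tokens(tokens):
--     result = []
--     for token in tokens:
--         for char in to_skip:
--             token = token.replace(char, '') #on nettoie le token des éléments indésirables
--
--         if token == '': #si un token devient vide, on skip
--             continue
--
--         if token == '&': #on remplace le & par and
--             token = 'and'
--
--         result.append(token)
--
--     return result
-- ===== SOURCE B (Python) =====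
-- SKIP = set('()[]{}:;=-/\\"\'')
--
-- def preprocess_tokens(tokens):
--     result = []
--     for token in tokens:
--         cleaned = ''.join(ch for ch in token if ch not in SKIP)
--         if cleaned:
--             result.append('and' if cleaned == '&' else cleaned)
--     return result
-- ===== Notes on version B (the rewrite author's own statement) =====
-- stated objective: idiomatic
-- what changed: Replaces A's 13 successive full-string replace() scans per token with a single character-level pass that filters out the skip characters via a set and joins the survivors.
import Mathlib
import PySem

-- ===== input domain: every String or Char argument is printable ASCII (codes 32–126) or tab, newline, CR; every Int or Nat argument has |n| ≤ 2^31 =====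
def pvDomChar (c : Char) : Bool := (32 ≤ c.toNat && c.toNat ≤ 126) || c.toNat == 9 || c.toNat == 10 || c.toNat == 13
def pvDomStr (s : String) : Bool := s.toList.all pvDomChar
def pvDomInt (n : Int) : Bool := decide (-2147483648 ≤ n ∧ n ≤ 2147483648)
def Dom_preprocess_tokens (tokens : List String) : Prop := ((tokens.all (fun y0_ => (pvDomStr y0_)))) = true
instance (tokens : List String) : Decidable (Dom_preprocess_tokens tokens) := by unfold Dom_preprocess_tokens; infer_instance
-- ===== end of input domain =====

-- B changes A's 13 successive replace() scans per token into one character-level filtering pass over a skip set.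

-- ===== PORT A =====
-- module-level constant to_skip (list of 1-char strings, in A's order)
def to_skip : List String := ["(", ")", "[", "]", "{", "}", ":", ";", "=", "-", "/", "\\", "\"", "'"]

def preprocess_tokens (tokens : List String) : List String :=
  tokens.foldl (fun result token =>
    let token := to_skip.foldl (fun t ch => PySem.Str.replace t ch "") token
    if token = "" then result
    else result ++ [if token = "&" then "and" else token]) []

-- ===== PORT B =====
-- SKIP = set('()[]{}:;=-/\\"\'') : the same characters, as a PySem.Set of Char
def SKIP : PySem.Set Char := PySem.Set.ofList ['(', ')', '[', ']', '{', '}', ':', ';', '=', '-', '/', '\\', '"', '\'']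

def preprocess_tokens_alt (tokens : List String) : List String :=
  tokens.foldl (fun result token =>
    let cleaned := String.ofList (token.toList.filter (fun ch => !(SKIP.contains ch)))
    if cleaned ≠ "" then
      result ++ [if cleaned = "&" then "and" else cleaned]
    else result) []

-- ===== PRECONDITION & SPEC =====
def Spec_preprocess_tokens (tokens : List String) (out : List String) : Prop := out = preprocess_tokens_alt tokens
instance (tokens : List String) (out : List String) : Decidable (Spec_preprocess_tokens tokens out) := by unfold Spec_preprocess_tokens; infer_instance

-- ===== CLAIM (what is proved, stated in full; the proofs are below) =====
def Claim_equal_preprocess_tokens : Prop := ∀ (tokens : List String), Dom_preprocess_tokens tokens → Spec_preprocess_tokens tokens (preprocess_tokens tokens)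

-- ===== LEMMAS AND PROOFS =====

-- replace.go with enough fuel and single-char pattern, empty replacement = filter
theorem go_filter (c : Char) (fuel : Nat) :
    ∀ (l acc : List Char), l.length ≤ fuel →
      PySem.Chars.replace.go [c] [] fuel l acc = acc.reverse ++ l.filter (fun x => x != c) := by
  induction fuel with
  | zero =>
    intro l acc h
    have : l = [] := List.eq_nil_of_length_eq_zero (Nat.le_zero.mp h)
    subst this
    simp [PySem.Chars.replace.go]
  | succ n ih =>
    intro l acc h
    cases l with
    | nil => simp [PySem.Chars.replace.go]
    | cons x t =>
      have hlen : t.length ≤ n := by simpa using h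
      by_cases hx : c = x
      · subst hx
        have hp : List.isPrefixOf [c] (c :: t) = true := by simp [List.isPrefixOf]
        simp only [PySem.Chars.replace.go, hp, if_true, List.reverse_nil, List.nil_append]
        have hd : List.drop [c].length (c :: t) = t := rfl
        rw [hd, ih t acc hlen]
        simp
      · have hbe : (c == x) = false := by simp [hx]
        have hp : List.isPrefixOf [c] (x :: t) = false := by simp [List.isPrefixOf, hbe]
        simp only [PySem.Chars.replace.go, hp, Bool.false_eq_true, if_false]
        rw [ih t (x :: acc) hlen]
        have hne : (x != c) = true := by simp [bne]; exact fun e => hx e.symm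
        simp [hne]

theorem replace_single (s : List Char) (c : Char) :
    PySem.Chars.replace s [c] [] = s.filter (fun x => x != c) := by
  rw [PySem.Chars.replace]
  simp only [List.isEmpty_cons, if_false, Bool.false_eq_true]
  simpa using go_filter c s.length s [] (le_refl _)

-- the fold of single-char replaces over a list of characters = one filtering pass
theorem fold_replace_filter (cs : List Char) :
    ∀ (t : String),
      ((cs.map (fun c => String.ofList [c])).foldl (fun t ch => PySem.Str.replace t ch "") t).toList
        = t.toList.filter (fun ch => !(cs.contains ch)) := by
  induction cs with
  | nil => intro t; simp
  | cons c cs ih =>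
    intro t
    simp only [List.map_cons, List.foldl_cons]
    rw [ih]
    have h1 : (PySem.Str.replace t (String.ofList [c]) "").toList
        = t.toList.filter (fun x => x != c) := by
      rw [PySem.Str.toList_replace]
      simp [replace_single]
    rw [h1, List.filter_filter]
    apply List.filter_congr
    intro x _
    by_cases hx : x = c <;> simp [hx]

theorem to_skip_eq : to_skip = (['(', ')', '[', ']', '{', '}', ':', ';', '=', '-', '/', '\\', '"', '\''].map (fun c => String.ofList [c])) := by
  decide

-- per-token: A's cleaned token equals B's cleaned string
theorem clean_eq (token : String) :
    to_skip.foldl (fun t ch => PySem.Str.replace t ch "") token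
      = String.ofList (token.toList.filter (fun ch => !(SKIP.contains ch))) := by
  apply String.toList_inj.mp
  rw [to_skip_eq, fold_replace_filter]
  simp only [String.toList_ofList]
  apply List.filter_congr
  intro x _
  rfl

-- ===== VERDICT (by name: the statement is the Claim_ definition above) =====
theorem preprocess_tokens_spec : Claim_equal_preprocess_tokens := by
  intro tokens _
  unfold Spec_preprocess_tokens preprocess_tokens preprocess_tokens_alt
  apply List.foldl_ext
  intro result token _
  simp only [clean_eq]
  split_ifs with h1 h2 <;> first | rfl | exact absurd h1 h2
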